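-- pv_equiv track=rewrite | github.com/ewdowiak/ScoPy4UT | src/scopycore.py | combinazioni
-- ===== SOURCE A (Python) =====
-- def combinazioni(lista):
-- 	import itertools
-- 	combinazioni = []
-- 	i = 2
-- 	while i <= len(lista)+1:
-- 		lista_combinazioni = itertools.combinations(lista, i)
-- 		for combinazione in lista_combinazioni:
-- 			combinazione_list = []
-- 			for elemento in combinazione:
-- 				combinazione_list.append(elemento)
-- 			combinazioni.append(combinazione_list)
-- 		i=i+1
-- 	return combinazioni
-- ===== SOURCE B (Python) =====
-- def combinazioni(lista):
--     # pick-or-skip recursion instead of itertools.combinations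
--     def go(xs, r, cur, acc):
--         if r == 0:
--             acc.append(cur[::-1])
--             return acc
--         if not xs:
--             return acc
--         go(xs[1:], r - 1, [xs[0]] + cur, acc)
--         return go(xs[1:], r, cur, acc)
--     acc = []
--     for r in range(2, len(lista) + 1):
--         go(lista, r, [], acc)
--     return acc
-- ===== Notes on version B (the rewrite author's own statement) =====
-- stated objective: alternative
-- what changed: Replaces the itertools.combinations library call (plus an element-by-element copy loop) with an explicit pick-or-skip recursion that builds each subset directly into a shared accumulator, and drops A's harmless extra iteration at size len+1.
import Mathlib
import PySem

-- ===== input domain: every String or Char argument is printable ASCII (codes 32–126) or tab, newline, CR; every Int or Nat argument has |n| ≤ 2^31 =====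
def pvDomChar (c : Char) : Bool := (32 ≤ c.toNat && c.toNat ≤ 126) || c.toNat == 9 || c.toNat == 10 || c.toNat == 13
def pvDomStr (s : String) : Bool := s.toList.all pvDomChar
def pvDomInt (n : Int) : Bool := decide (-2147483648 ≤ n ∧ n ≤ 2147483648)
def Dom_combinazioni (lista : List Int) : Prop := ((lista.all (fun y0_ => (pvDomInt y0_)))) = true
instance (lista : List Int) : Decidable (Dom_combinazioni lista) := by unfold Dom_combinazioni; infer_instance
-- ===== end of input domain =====

-- B is an alternative of the same cost: itertools.combinations is replaced by an explicit
-- pick-or-skip recursion; return values are proved equal.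

-- ===== PORT A =====
-- itertools.combinations(lista, i), in lexicographic index order (standard recursion)
def pvCombsA : List Int → Nat → List (List Int)
  | _, 0 => [[]]
  | [], _ + 1 => []
  | x :: xs, r + 1 => (pvCombsA xs r).map (fun c => x :: c) ++ pvCombsA xs (r + 1)

-- while i <= len(lista)+1 starting at i=2: i ranges over [2, …, len+1]
def combinazioni (lista : List Int) : List (List Int) :=
  (List.range' 2 lista.length).foldl
    (fun acc i =>
      (pvCombsA lista i).foldl
        (fun acc2 combinazione =>
          acc2 ++ [combinazione.foldl (fun cl e => cl ++ [e]) []]) acc)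
    []

-- ===== PORT B =====
-- go(xs, r, cur, acc): pick xs[0] (recurse with r-1) then skip it; r=0 appends cur reversed
def pvGoB : List Int → Nat → List Int → List (List Int) → List (List Int)
  | _, 0, cur, acc => acc ++ [cur.reverse]
  | [], _ + 1, _, acc => acc
  | x :: rest, r + 1, cur, acc => pvGoB rest (r + 1) cur (pvGoB rest r (x :: cur) acc)

def combinazioni_alt (lista : List Int) : List (List Int) :=
  (List.range' 2 (lista.length - 1)).foldl (fun acc r => pvGoB lista r [] acc) []

-- ===== PRECONDITION & SPEC =====
def Spec_combinazioni (lista : List Int) (out : List (List Int)) : Prop := out = combinazioni_alt lista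
instance (lista : List Int) (out : List (List Int)) : Decidable (Spec_combinazioni lista out) := by unfold Spec_combinazioni; infer_instance

-- ===== CLAIM (what is proved, stated in full; the proofs are below) =====
def Claim_equal_combinazioni : Prop := ∀ (lista : List Int), Dom_combinazioni lista → Spec_combinazioni lista (combinazioni lista)

-- ===== LEMMAS AND PROOFS =====

-- the inner element-copy loop of A is the identity
theorem pv_copy_id (c cl : List Int) : c.foldl (fun l e => l ++ [e]) cl = cl ++ c := by
  induction c generalizing cl with
  | nil => simp
  | cons x xs ih => simp [List.foldl, ih, List.append_assoc]

theorem pv_foldl_append (cs : List (List Int)) (acc : List (List Int)) :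
    cs.foldl (fun a c => a ++ [c.foldl (fun l e => l ++ [e]) []]) acc = acc ++ cs := by
  induction cs generalizing acc with
  | nil => simp
  | cons c cs ih => rw [List.foldl_cons, pv_copy_id, ih]; simp

theorem pv_combsA_big (xs : List Int) (r : Nat) (h : xs.length < r) : pvCombsA xs r = [] := by
  induction xs generalizing r with
  | nil => cases r with | zero => omega | succ r => rfl
  | cons x xs ih =>
    cases r with
    | zero => omega
    | succ r =>
      simp only [pvCombsA]
      rw [ih r (by simpa using h), ih (r + 1) (by simp at h; omega)]
      simp

theorem pv_goB_eq (xs : List Int) (r : Nat) (cur : List Int) (acc : List (List Int)) :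
    pvGoB xs r cur acc = acc ++ (pvCombsA xs r).map (fun c => cur.reverse ++ c) := by
  induction xs generalizing r cur acc with
  | nil =>
    cases r with
    | zero => simp [pvGoB, pvCombsA]
    | succ r => simp [pvGoB, pvCombsA]
  | cons x rest ih =>
    cases r with
    | zero => simp [pvGoB, pvCombsA]
    | succ r =>
      simp only [pvGoB, pvCombsA, ih, List.map_append, List.map_map, List.append_assoc]
      congr 1
      simp [Function.comp_def, List.append_assoc]

theorem pv_goB_nil (xs : List Int) (r : Nat) (acc : List (List Int)) :
    pvGoB xs r [] acc = acc ++ pvCombsA xs r := by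
  simp [pv_goB_eq]

theorem pv_A_flat (lista : List Int) (is : List Nat) (acc : List (List Int)) :
    is.foldl
      (fun acc i =>
        (pvCombsA lista i).foldl
          (fun acc2 c => acc2 ++ [c.foldl (fun cl e => cl ++ [e]) []]) acc) acc
    = acc ++ is.flatMap (fun i => pvCombsA lista i) := by
  induction is generalizing acc with
  | nil => simp
  | cons i is ih =>
    rw [List.foldl_cons, pv_foldl_append, ih]
    simp [List.flatMap_cons, List.append_assoc]

theorem pv_B_flat (lista : List Int) (is : List Nat) (acc : List (List Int)) :
    is.foldl (fun acc r => pvGoB lista r [] acc) acc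
    = acc ++ is.flatMap (fun i => pvCombsA lista i) := by
  induction is generalizing acc with
  | nil => simp
  | cons i is ih =>
    rw [List.foldl_cons, pv_goB_nil, ih]
    simp [List.flatMap_cons, List.append_assoc]

-- ===== VERDICT (by name: the statement is the Claim_ definition above) =====
theorem combinazioni_spec : Claim_equal_combinazioni := by
  intro lista _
  unfold Spec_combinazioni combinazioni combinazioni_alt
  rw [pv_A_flat, pv_B_flat]
  cases h : lista.length with
  | zero => simp
  | succ n =>
    rw [List.range'_concat, Nat.add_sub_cancel, List.flatMap_append]
    rw [show List.flatMap (fun i => pvCombsA lista i) [2 + 1 * n] = pvCombsA lista (2 + 1 * n) by simp]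
    rw [pv_combsA_big lista (2 + 1 * n) (by omega)]
    simp
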